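-- pv_equiv track=rewrite | github.com/Pawan459/infytq-pf-day9 | medium/Problem_44.py | check_correct_depth
-- ===== SOURCE A (Python) =====
-- def check_correct_depth(input_list, depth=0):
--     #start writing your code here
--     open = 0
--     for i in input_list:
--         if i == '(':
--             open += 1
--         elif i == ')':
--             open -= 1
--         else:
--             if open == int(i):
--                 continue
--             return False
--     return True
-- ===== SOURCE B (Python) =====
-- def check_correct_depth(input_list, depth=0):
--     # Stateless check: the nesting level at position i is recomputed from
--     # scratch as a prefix count, instead of maintaining a running counter.
--     for i, tok in enumerate(input_list):
--         if tok not in ('(', ')'):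
--             if int(tok) != input_list[:i].count('(') - input_list[:i].count(')'):
--                 return False
--     return True
-- ===== Notes on version B (the rewrite author's own statement) =====
-- stated objective: alternative
-- what changed: B removes A's running 'open' counter entirely: for each non-bracket token it recomputes the nesting level from scratch as a prefix recount input_list[:i].count('(') - input_list[:i].count(')'), a stateless nested-scan check instead of a single stateful accumulator loop.
import Mathlib
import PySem

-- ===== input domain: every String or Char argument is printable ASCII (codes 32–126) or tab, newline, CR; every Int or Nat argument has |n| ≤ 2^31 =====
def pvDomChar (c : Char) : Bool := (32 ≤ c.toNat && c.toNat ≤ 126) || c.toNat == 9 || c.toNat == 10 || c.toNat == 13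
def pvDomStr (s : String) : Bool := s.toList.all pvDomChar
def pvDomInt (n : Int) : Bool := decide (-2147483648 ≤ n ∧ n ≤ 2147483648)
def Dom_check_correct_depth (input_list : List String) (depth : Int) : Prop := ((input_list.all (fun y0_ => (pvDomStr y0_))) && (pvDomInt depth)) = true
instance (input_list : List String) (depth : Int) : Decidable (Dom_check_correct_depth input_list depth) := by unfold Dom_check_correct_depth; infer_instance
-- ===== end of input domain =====

-- B replaces A's running 'open' counter by a stateless nested-scan (each non-bracket token is
-- checked against a prefix recount); alternative algorithm, same results, not faster.


-- ===== PORT A =====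
-- A's loop, state `opn` (Python's `open`); int(i) = PySem.Int.ofStr? (none = ValueError, excluded by Pre_)
def chkLoop : List String → Int → Bool
  | [], _ => true
  | i :: rest, opn =>
    if i = "(" then chkLoop rest (opn + 1)
    else if i = ")" then chkLoop rest (opn - 1)
    else
      match PySem.Int.ofStr? i with
      | some v => if opn = v then chkLoop rest opn else false
      | none => false   -- Python raises ValueError here; Pre_ excludes such inputs

def check_correct_depth (input_list : List String) (depth : Int) : Bool :=
  chkLoop input_list 0

-- ===== PORT B =====
-- Source B's loop `for i, tok in enumerate(input_list)`: index counter i, the full list kept for the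
-- prefix recount; input_list[:i] = List.take i (exact: i ≥ 0), .count('(') = List.count
def altGo (full : List String) (i : Nat) : List String → Bool
  | [] => true
  | tok :: rest =>
    if ¬ (tok = "(" ∨ tok = ")") then
      match PySem.Int.ofStr? tok with
      | some v =>
        if v ≠ ((full.take i).count "(" : Int) - ((full.take i).count ")" : Int) then false
        else altGo full (i + 1) rest
      | none => false   -- int(tok) raises ValueError here; Pre_ excludes such inputs
    else altGo full (i + 1) rest

def check_correct_depth_alt (input_list : List String) (depth : Int) : Bool :=
  altGo input_list 0 input_list

-- ===== PRECONDITION & SPEC =====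
-- helpers for Pre_ (stated on the raw input; independent of both ports)
def pvTokGood (s : String) : Bool := s = "(" || s = ")" || (PySem.Int.ofStr? s).isSome
-- nesting level in front of position i, as plain prefix counts
def pvNest (l : List String) (i : Nat) : Int :=
  ((l.take i).count "(" : Int) - ((l.take i).count ")" : Int)

-- Pre_ admits exactly the inputs on which A returns: either every element is a bracket or an int
-- literal, or some position i holds an int literal differing from its nesting level (A returns
-- False there) with only brackets/int literals before it; the only inputs excluded are those on
-- which A raises ValueError from int(i) — and B raises the same ValueError on exactly those.
def Pre_check_correct_depth (input_list : List String) (depth : Int) : Prop :=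
  (∀ s ∈ input_list, pvTokGood s = true) ∨
  ∃ i < input_list.length,
    (∀ j < i, pvTokGood (input_list.getD j "") = true) ∧
    input_list.getD i "" ≠ "(" ∧ input_list.getD i "" ≠ ")" ∧
    (PySem.Int.ofStr? (input_list.getD i "")).isSome ∧
    PySem.Int.ofStr? (input_list.getD i "") ≠ some (pvNest input_list i)
instance (input_list : List String) (depth : Int) : Decidable (Pre_check_correct_depth input_list depth) := by unfold Pre_check_correct_depth; infer_instance
def pvWitness_check_correct_depth : List String × Int := (["(", "1", "(", "2", ")", "1", ")"], 0)

def Spec_check_correct_depth (input_list : List String) (depth : Int) (out : Bool) : Prop := out = check_correct_depth_alt input_list depth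
instance (input_list : List String) (depth : Int) (out : Bool) : Decidable (Spec_check_correct_depth input_list depth out) := by unfold Spec_check_correct_depth; infer_instance

-- ===== CLAIM (what is proved, stated in full; the proofs are below) =====
def Claim_equal_check_correct_depth : Prop := ∀ (input_list : List String) (depth : Int), Dom_check_correct_depth input_list depth → Pre_check_correct_depth input_list depth → Spec_check_correct_depth input_list depth (check_correct_depth input_list depth)

-- ===== LEMMAS AND PROOFS =====
-- Core invariant: A's loop on the suffix, started from the prefix's bracket balance, equals
-- B's indexed pass on that suffix (holds for every input; a raise is `false` on both sides,
-- at the same position, so Pre_ is not even needed for the ports' agreement).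
theorem chkLoop_eq_altGo (suf : List String) : ∀ pre : List String,
    chkLoop suf ((pre.count "(" : Int) - (pre.count ")" : Int))
      = altGo (pre ++ suf) pre.length suf := by
  induction suf with
  | nil => intro pre; rfl
  | cons tok rest ih =>
    intro pre
    have htake : (pre ++ tok :: rest).take pre.length = pre := List.take_left ..
    have hass : pre ++ tok :: rest = (pre ++ [tok]) ++ rest := by simp
    have hlen : (pre ++ [tok]).length = pre.length + 1 := by simp
    have h1 := ih (pre ++ [tok])
    rw [← hass, hlen] at h1
    by_cases hc : tok = "("
    · have hcnt : ((pre ++ [tok]).count "(" : Int) - ((pre ++ [tok]).count ")" : Int)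
        = ((pre.count "(" : Int) - (pre.count ")" : Int)) + 1 := by
        subst hc; simp [List.count_append]; ring
      rw [hcnt] at h1
      simp only [chkLoop, altGo, hc, if_pos, true_or, not_true, if_neg, not_false_iff]
      simpa [hc] using h1
    · by_cases hc' : tok = ")"
      · have hcnt : ((pre ++ [tok]).count "(" : Int) - ((pre ++ [tok]).count ")" : Int)
          = ((pre.count "(" : Int) - (pre.count ")" : Int)) - 1 := by
          subst hc'; simp [List.count_append, hc]; ring
        rw [hcnt] at h1
        simpa [chkLoop, altGo, hc, hc'] using h1
      · have hcnt : ((pre ++ [tok]).count "(" : Int) - ((pre ++ [tok]).count ")" : Int)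
          = ((pre.count "(" : Int) - (pre.count ")" : Int)) := by
          simp [List.count_append, hc, hc']
        rw [hcnt] at h1
        simp only [chkLoop, altGo, hc, hc', or_self, not_false_iff, if_neg, if_pos]
        cases h : PySem.Int.ofStr? tok with
        | none => simp
        | some v =>
          simp only [htake]
          by_cases hv : ((pre.count "(" : Int) - (pre.count ")" : Int)) = v
          · subst hv; simp [h1]
          · have hv' : v ≠ (pre.count "(" : Int) - (pre.count ")" : Int) := fun e => hv e.symm
            simp [hv, hv']

-- ===== VERDICT (by name: the statement is the Claim_ definition above) =====
theorem check_correct_depth_spec : Claim_equal_check_correct_depth := by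
  intro input_list depth _ _
  unfold Spec_check_correct_depth check_correct_depth check_correct_depth_alt
  simpa using chkLoop_eq_altGo input_list []
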